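-- pv_equiv track=rewrite | github.com/Muendi/Kata5 | frogs.py | solution
-- ===== SOURCE A (Python) =====
-- def solution(blocks):
--     n = len(blocks)
--
--     #array to store max distance
--     max_distance = [0] * n
--
--     #max distance when frogs jump to the right
--     for i in range(1, n):
--         if blocks[i] >= blocks[i - 1]:
--             max_distance[i] = max_distance[i-1]+1
--
--     #max distance when frogs jump to the left
--     for i in range(n - 2, -1, -1):
--         if blocks[i] >= blocks[i + 1]:
--             max_distance[i] = max(max_distance[i], max_distance[i + 1]+1)
--
--     #max distance in the max distance array
--     return max(max_distance)
-- ===== SOURCE B (Python) =====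
-- def solution(blocks):
--     # single forward pass: answer = max over j of (len of non-decreasing
--     # run ending at j) + (len of non-increasing run ending at j)
--     best = inc = dec = 0
--     for i in range(1, len(blocks)):
--         inc = inc + 1 if blocks[i] >= blocks[i - 1] else 0
--         dec = dec + 1 if blocks[i] <= blocks[i - 1] else 0
--         if inc + dec > best:
--             best = inc + dec
--     return best
-- ===== Notes on version B (the rewrite author's own statement) =====
-- stated objective: simpler
-- what changed: Replaces A's two passes over an auxiliary max_distance array (forward fill, then a backward max-combining pass, then max of the array) by a single forward pass keeping three integer counters (longest non-decreasing run and longest non-increasing run ending at the current block, and the best sum of the two), using the fact that A's answer equals max over j of fwd-run(j)+bwd-run(j); no list is allocated or re-scanned.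
-- outside the precondition, e.g. on solution([]): A raises ValueError, B returns 0
import Mathlib
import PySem

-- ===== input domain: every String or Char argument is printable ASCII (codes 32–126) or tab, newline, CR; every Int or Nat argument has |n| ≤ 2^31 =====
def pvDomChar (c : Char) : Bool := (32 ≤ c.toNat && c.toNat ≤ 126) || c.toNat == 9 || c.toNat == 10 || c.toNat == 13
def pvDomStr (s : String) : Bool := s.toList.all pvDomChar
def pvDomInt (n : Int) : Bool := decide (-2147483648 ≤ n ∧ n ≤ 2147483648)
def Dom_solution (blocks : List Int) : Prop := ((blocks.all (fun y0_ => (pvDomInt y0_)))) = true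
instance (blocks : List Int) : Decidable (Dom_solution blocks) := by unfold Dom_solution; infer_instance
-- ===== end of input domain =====

-- B replaces A's two array passes by one forward pass with three counters; proved equal on nonempty lists (A raises ValueError on []).


-- ===== PORT A =====
def solution (blocks : List Int) : Int :=
  let n : Int := blocks.length
  let md0 : List Int := List.replicate blocks.length 0
  -- forward pass: for i in range(1, n)
  let md1 : List Int :=
    (PySem.List.pyRange 1 n 1).foldl (fun md i =>
      if PySem.List.pyGetD blocks i 0 ≥ PySem.List.pyGetD blocks (i-1) 0
      then PySem.List.pySetD md i (PySem.List.pyGetD md (i-1) 0 + 1) else md) md0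
  -- backward pass: for i in range(n-2, -1, -1)
  let md2 : List Int :=
    (PySem.List.pyRange (n-2) (-1) (-1)).foldl (fun md i =>
      if PySem.List.pyGetD blocks i 0 ≥ PySem.List.pyGetD blocks (i+1) 0
      then PySem.List.pySetD md i
             (max (PySem.List.pyGetD md i 0) (PySem.List.pyGetD md (i+1) 0 + 1))
      else md) md1
  -- max(max_distance): raises on empty, excluded by Pre_solution
  (PySem.List.max? md2 (fun y => y)).getD 0

-- ===== PORT B =====
def solution_alt (blocks : List Int) : Int :=
  ((PySem.List.pyRange 1 (blocks.length : Int) 1).foldl (fun (s : Int × Int × Int) i =>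
      let inc : Int := if PySem.List.pyGetD blocks i 0 ≥ PySem.List.pyGetD blocks (i-1) 0 then s.2.1 + 1 else 0
      let dec : Int := if PySem.List.pyGetD blocks i 0 ≤ PySem.List.pyGetD blocks (i-1) 0 then s.2.2 + 1 else 0
      (if inc + dec > s.1 then inc + dec else s.1, inc, dec))
    (0, 0, 0)).1

-- ===== PRECONDITION & SPEC =====
-- Pre_ excludes exactly the empty list, on which A's max([]) raises ValueError.
def Pre_solution (blocks : List Int) : Prop := blocks ≠ []
instance (blocks : List Int) : Decidable (Pre_solution blocks) := by unfold Pre_solution; infer_instance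
def pvWitness_solution : List Int := [1, 2, 1]

def Spec_solution (blocks : List Int) (out : Int) : Prop := out = solution_alt blocks
instance (blocks : List Int) (out : Int) : Decidable (Spec_solution blocks out) := by unfold Spec_solution; infer_instance

-- ===== CLAIM (what is proved, stated in full; the proofs are below) =====
def Claim_equal_solution : Prop := ∀ (blocks : List Int), Dom_solution blocks → Pre_solution blocks → Spec_solution blocks (solution blocks)

-- ===== LEMMAS AND PROOFS =====

-- length of the longest non-decreasing run (in edges) ending at index i
def fwdZ (xs : List Int) : Nat → Int
  | 0 => 0
  | i+1 => if xs.getD (i+1) 0 ≥ xs.getD i 0 then fwdZ xs i + 1 else 0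

-- length of the longest non-increasing run (in edges) ending at index i
def bwdZ (xs : List Int) : Nat → Int
  | 0 => 0
  | i+1 => if xs.getD (i+1) 0 ≤ xs.getD i 0 then bwdZ xs i + 1 else 0

-- B's running best: max over j ≤ k of fwdZ j + bwdZ j
def bestZ (xs : List Int) : Nat → Int
  | 0 => 0
  | k+1 => max (bestZ xs k) (fwdZ xs (k+1) + bwdZ xs (k+1))

-- value of A's max_distance[i] after the backward pass
def gZ (xs : List Int) (i : Nat) : Int :=
  if h : i + 1 < xs.length then
    (if xs.getD i 0 ≥ xs.getD (i+1) 0 then max (fwdZ xs i) (gZ xs (i+1) + 1) else fwdZ xs i)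
  else fwdZ xs i
termination_by xs.length - i

-- max over i ≤ k of gZ i
def maxgZ (xs : List Int) : Nat → Int
  | 0 => gZ xs 0
  | k+1 => max (maxgZ xs k) (gZ xs (k+1))

lemma bwdZ_nonneg (xs : List Int) : ∀ i, 0 ≤ bwdZ xs i := by
  intro i; induction i with
  | zero => simp [bwdZ]
  | succ i ih => simp only [bwdZ]; split <;> omega

lemma getD_set_int (l : List Int) (n : Nat) (v : Int) (j : Nat) :
    (l.set n v).getD j 0 = if j = n ∧ n < l.length then v else l.getD j 0 := by
  simp [List.getD_eq_getElem?_getD, List.getElem?_set]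
  split_ifs <;> simp_all

-- B's loop invariant
lemma B_inv (xs : List Int) (k : Nat) :
    (PySem.List.pyRange 1 (1 + (k : Int)) 1).foldl (fun (s : Int × Int × Int) i =>
      let inc : Int := if PySem.List.pyGetD xs i 0 ≥ PySem.List.pyGetD xs (i-1) 0 then s.2.1 + 1 else 0
      let dec : Int := if PySem.List.pyGetD xs i 0 ≤ PySem.List.pyGetD xs (i-1) 0 then s.2.2 + 1 else 0
      (if inc + dec > s.1 then inc + dec else s.1, inc, dec))
      (0, 0, 0) = (bestZ xs k, fwdZ xs k, bwdZ xs k) := by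
  induction k with
  | zero =>
    rw [show (1 + ((0:Nat):Int)) = 1 by norm_num, PySem.List.pyRange_one_eq_nil le_rfl]
    simp [bestZ, fwdZ, bwdZ]
  | succ k ih =>
    rw [show (1 + ((k+1:Nat):Int)) = (1 + (k:Int)) + 1 by push_cast; ring,
        PySem.List.pyRange_one_succ_right (by omega), List.foldl_append, ih]
    simp only [List.foldl_cons, List.foldl_nil]
    rw [show (1 + (k:Int)) - 1 = ((k:Nat):Int) by omega,
        show (1 + (k:Int)) = ((k+1:Nat):Int) by omega]
    simp only [PySem.List.pyGetD_natCast]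
    show (_ , _, _) = _
    simp only [Prod.mk.injEq]
    refine ⟨?_, rfl, rfl⟩
    simp only [fwdZ, bwdZ, bestZ]
    split_ifs <;> omega

-- first pass, recast over a Nat range
lemma pass1_toNat (xs : List Int) (k : Nat) :
    List.foldl (fun md i =>
      if PySem.List.pyGetD xs i 0 ≥ PySem.List.pyGetD xs (i-1) 0
      then PySem.List.pySetD md i (PySem.List.pyGetD md (i-1) 0 + 1) else md)
      (List.replicate xs.length (0:Int)) (PySem.List.pyRange 1 (1 + (k:Int)) 1)
  = List.foldl (fun md j =>
      if xs.getD (j+1) 0 ≥ xs.getD j 0 then md.set (j+1) (md.getD j 0 + 1) else md)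
      (List.replicate xs.length (0:Int)) (List.range k) := by
  rw [PySem.List.pyRange_one, show ((1 + (k:Int)) - 1).toNat = k by omega, List.foldl_map]
  apply PySem.List.foldl_congr_mem
  intro md j _
  rw [show (1:Int) + (j:Nat) = ((j+1:Nat):Int) by omega,
      show ((j+1:Nat):Int) - 1 = ((j:Nat):Int) by omega]
  simp only [PySem.List.pyGetD_natCast, PySem.List.pySetD_natCast]

-- first pass invariant (over the Nat fold)
lemma pass1_inv (xs : List Int) : ∀ (k : Nat), k < xs.length →
    (List.foldl (fun md j =>
      if xs.getD (j+1) 0 ≥ xs.getD j 0 then md.set (j+1) (md.getD j 0 + 1) else md)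
      (List.replicate xs.length (0:Int)) (List.range k)).length = xs.length ∧
    ∀ j < xs.length,
      (List.foldl (fun md j =>
        if xs.getD (j+1) 0 ≥ xs.getD j 0 then md.set (j+1) (md.getD j 0 + 1) else md)
        (List.replicate xs.length (0:Int)) (List.range k)).getD j 0 = if j ≤ k then fwdZ xs j else 0 := by
  intro k
  induction k with
  | zero =>
    intro _
    simp only [List.range_zero, List.foldl_nil]
    refine ⟨by simp, fun j hj => ?_⟩
    have hrep : (List.replicate xs.length (0:Int)).getD j 0 = 0 := by
      simp [List.getD_eq_getElem?_getD, List.getElem?_replicate]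
      split_ifs <;> rfl
    rw [hrep]
    split_ifs with h
    · interval_cases j; simp [fwdZ]
    · rfl
  | succ k ih =>
    intro hk
    obtain ⟨ihlen, ihget⟩ := ih (by omega)
    rw [List.range_succ, List.foldl_append, List.foldl_cons, List.foldl_nil]
    by_cases hc : xs.getD (k+1) 0 ≥ xs.getD k 0
    · rw [if_pos hc]
      refine ⟨by rw [List.length_set]; exact ihlen, fun j hj => ?_⟩
      rw [getD_set_int, ihlen]
      by_cases hj1 : j = k + 1
      · subst hj1
        rw [if_pos ⟨rfl, by omega⟩, ihget k (by omega), if_pos le_rfl, if_pos le_rfl]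
        simp only [fwdZ]
        rw [if_pos hc]
      · rw [if_neg (by tauto), ihget j hj]
        by_cases hj2 : j ≤ k
        · rw [if_pos hj2, if_pos (by omega)]
        · rw [if_neg hj2, if_neg (by omega)]
    · rw [if_neg hc]
      refine ⟨ihlen, fun j hj => ?_⟩
      rw [ihget j hj]
      by_cases hj1 : j = k + 1
      · subst hj1
        rw [if_neg (by omega), if_pos le_rfl]
        simp only [fwdZ]
        rw [if_neg hc]
      · by_cases hj2 : j ≤ k
        · rw [if_pos hj2, if_pos (by omega)]
        · rw [if_neg hj2, if_neg (by omega)]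

-- second (backward) pass invariant
lemma pass2_inv (xs : List Int) : ∀ i : Nat, i ≤ xs.length - 1 → ∀ m : List Int,
    m.length = xs.length →
    (∀ j < xs.length, m.getD j 0 = if i ≤ j then gZ xs j else fwdZ xs j) →
    ((PySem.List.pyRange ((i : Int) - 1) (-1) (-1)).foldl (fun md i =>
        if PySem.List.pyGetD xs i 0 ≥ PySem.List.pyGetD xs (i+1) 0
        then PySem.List.pySetD md i
               (max (PySem.List.pyGetD md i 0) (PySem.List.pyGetD md (i+1) 0 + 1))
        else md) m).length = xs.length ∧
    ∀ j < xs.length,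
      ((PySem.List.pyRange ((i : Int) - 1) (-1) (-1)).foldl (fun md i =>
        if PySem.List.pyGetD xs i 0 ≥ PySem.List.pyGetD xs (i+1) 0
        then PySem.List.pySetD md i
               (max (PySem.List.pyGetD md i 0) (PySem.List.pyGetD md (i+1) 0 + 1))
        else md) m).getD j 0 = gZ xs j := by
  intro i
  induction i with
  | zero =>
    intro _ m hmlen hmget
    rw [show ((0:Nat):Int) - 1 = (-1:Int) by norm_num,
        PySem.List.pyRange_neg_one_eq_nil (by norm_num)]
    simp only [List.foldl_nil]
    exact ⟨hmlen, fun j hj => by rw [hmget j hj, if_pos (Nat.zero_le j)]⟩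
  | succ i ih =>
    intro hi m hmlen hmget
    have hi1 : i + 1 < xs.length := by omega
    have hgi : gZ xs i = if xs.getD i 0 ≥ xs.getD (i+1) 0
        then max (fwdZ xs i) (gZ xs (i+1) + 1) else fwdZ xs i := by
      conv_lhs => rw [gZ]
      rw [dif_pos hi1]
    rw [show ((i+1:Nat):Int) - 1 = ((i:Nat):Int) by omega,
        PySem.List.pyRange_neg_one_cons (by omega)]
    simp only [List.foldl_cons]
    rw [show ((i:Nat):Int) + 1 = ((i+1:Nat):Int) by omega]
    simp only [PySem.List.pyGetD_natCast, PySem.List.pySetD_natCast]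
    have hvi : m.getD i 0 = fwdZ xs i := by rw [hmget i (by omega), if_neg (by omega)]
    have hvi1 : m.getD (i+1) 0 = gZ xs (i+1) := by rw [hmget (i+1) (by omega), if_pos (by omega)]
    refine ih (by omega) _ ?_ ?_
    · split_ifs
      · rw [List.length_set]; exact hmlen
      · exact hmlen
    · intro j hj
      by_cases hc : xs.getD i 0 ≥ xs.getD (i+1) 0
      · rw [if_pos hc, getD_set_int, hmlen]
        by_cases hj1 : j = i
        · subst hj1
          rw [if_pos ⟨rfl, by omega⟩, if_pos le_rfl, hvi, hvi1, hgi, if_pos hc]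
        · rw [if_neg (by tauto), hmget j hj]
          by_cases hj2 : i + 1 ≤ j
          · rw [if_pos hj2, if_pos (by omega)]
          · rw [if_neg hj2, if_neg (by omega)]
      · rw [if_neg hc, hmget j hj]
        by_cases hj1 : j = i
        · subst hj1
          rw [if_neg (by omega), if_pos le_rfl, hgi, if_neg hc]
        · by_cases hj2 : i + 1 ≤ j
          · rw [if_pos hj2, if_pos (by omega)]
          · rw [if_neg hj2, if_neg (by omega)]

lemma fwd_le_g (xs : List Int) (i : Nat) : fwdZ xs i ≤ gZ xs i := by
  unfold gZ; split
  · split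
    · exact le_max_left _ _
    · exact le_refl _
  · exact le_refl _

def NonInc (xs : List Int) (i j : Nat) : Prop :=
  ∀ k, i ≤ k → k < j → xs.getD (k+1) 0 ≤ xs.getD k 0

lemma noninc_le_bwd (xs : List Int) : ∀ j i, i ≤ j → NonInc xs i j → (j : Int) - i ≤ bwdZ xs j := by
  intro j
  induction j with
  | zero => intro i hi _; interval_cases i; simpa using bwdZ_nonneg xs 0
  | succ j ih =>
    intro i hi hni
    rcases Nat.eq_or_lt_of_le hi with h | h
    · subst h; have := bwdZ_nonneg xs (j+1); push_cast; omega
    · have hij : i ≤ j := by omega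
      have hstep : xs.getD (j+1) 0 ≤ xs.getD j 0 := hni j hij (by omega)
      have := ih i hij (fun k hk1 hk2 => hni k hk1 (by omega))
      simp only [bwdZ, if_pos hstep]
      push_cast; omega

lemma g_reach (xs : List Int) : ∀ i, i < xs.length →
    ∃ j, i ≤ j ∧ j < xs.length ∧ gZ xs i = fwdZ xs j + ((j : Int) - i) ∧ NonInc xs i j := by
  have H : ∀ (t i : Nat), i < xs.length → xs.length - i ≤ t →
      ∃ j, i ≤ j ∧ j < xs.length ∧ gZ xs i = fwdZ xs j + ((j : Int) - i) ∧ NonInc xs i j := by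
    intro t
    induction t with
    | zero => intro i hi ht; omega
    | succ t ih =>
      intro i hi ht
      unfold gZ
      by_cases h1 : i + 1 < xs.length
      · rw [dif_pos h1]
        by_cases hc : xs.getD i 0 ≥ xs.getD (i+1) 0
        · rw [if_pos hc]
          rcases le_total (gZ xs (i+1) + 1) (fwdZ xs i) with hm | hm
          · refine ⟨i, le_rfl, hi, ?_, fun k hk1 hk2 => by omega⟩
            rw [max_eq_left hm]; simp
          · obtain ⟨j, hij, hjn, hg, hni⟩ := ih (i+1) h1 (by omega)
            refine ⟨j, by omega, hjn, ?_, ?_⟩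
            · rw [max_eq_right hm, hg]; push_cast; ring
            · intro k hk1 hk2
              rcases Nat.eq_or_lt_of_le hk1 with h | h
              · subst h; exact hc
              · exact hni k (by omega) hk2
        · rw [if_neg hc]
          exact ⟨i, le_rfl, hi, by simp, fun k hk1 hk2 => by omega⟩
      · rw [dif_neg h1]
        exact ⟨i, le_rfl, hi, by simp, fun k hk1 hk2 => by omega⟩
  exact fun i hi => H xs.length i hi (by omega)

lemma fwdbwd_le_best (xs : List Int) : ∀ k j, j ≤ k → fwdZ xs j + bwdZ xs j ≤ bestZ xs k := by
  intro k
  induction k with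
  | zero => intro j hj; interval_cases j; simp [bestZ, fwdZ, bwdZ]
  | succ k ih =>
    intro j hj
    rcases Nat.eq_or_lt_of_le hj with h | h
    · subst h; simp only [bestZ]; exact le_max_right _ _
    · exact le_trans (ih j (by omega)) (le_max_left _ _)

lemma g_le_best (xs : List Int) (i : Nat) (hi : i < xs.length) :
    gZ xs i ≤ bestZ xs (xs.length - 1) := by
  obtain ⟨j, hij, hjn, hg, hni⟩ := g_reach xs i hi
  have h1 : (j : Int) - i ≤ bwdZ xs j := noninc_le_bwd xs j i hij hni
  have h2 := fwdbwd_le_best xs (xs.length - 1) j (by omega)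
  omega

lemma maxg_le_best (xs : List Int) : ∀ k, k ≤ xs.length - 1 → xs.length ≠ 0 →
    maxgZ xs k ≤ bestZ xs (xs.length - 1) := by
  intro k
  induction k with
  | zero => intro _ hn; simpa [maxgZ] using g_le_best xs 0 (by omega)
  | succ k ih =>
    intro hk hn
    simp only [maxgZ]
    exact max_le (ih (by omega) hn) (g_le_best xs (k+1) (by omega))

lemma bwd_window (xs : List Int) : ∀ (d j : Nat), (d : Int) < bwdZ xs j →
    d < j ∧ xs.getD (j - d) 0 ≤ xs.getD (j - d - 1) 0 := by
  intro d
  induction d with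
  | zero =>
    intro j hj
    cases j with
    | zero => simp [bwdZ] at hj
    | succ j' =>
      simp only [bwdZ] at hj
      by_cases hc : xs.getD (j'+1) 0 ≤ xs.getD j' 0
      · exact ⟨Nat.succ_pos _, by simpa using hc⟩
      · rw [if_neg hc] at hj; omega
  | succ d ih =>
    intro j hj
    cases j with
    | zero => simp [bwdZ] at hj; omega
    | succ j' =>
      simp only [bwdZ] at hj
      by_cases hc : xs.getD (j'+1) 0 ≤ xs.getD j' 0
      · rw [if_pos hc] at hj
        obtain ⟨h1, h2⟩ := ih j' (by omega)
        refine ⟨by omega, ?_⟩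
        have e1 : j'+1-(d+1) = j'-d := by omega
        rw [e1]; exact h2
      · rw [if_neg hc] at hj; omega

lemma descend (xs : List Int) : ∀ (d j : Nat), j < xs.length → (d : Int) ≤ bwdZ xs j →
    fwdZ xs j + d ≤ gZ xs (j - d) := by
  intro d
  induction d with
  | zero => intro j _ _; simpa using fwd_le_g xs j
  | succ d ih =>
    intro j hj hd
    have hw : (d : Int) < bwdZ xs j := by push_cast at hd; omega
    obtain ⟨hdj, hc⟩ := bwd_window xs d j hw
    have hsub : j - (d+1) = j - d - 1 := by omega
    have hsucc : (j - d - 1) + 1 = j - d := by omega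
    have hlt : (j - d - 1) + 1 < xs.length := by omega
    have hih := ih j hj (le_of_lt hw)
    rw [hsub]
    unfold gZ
    rw [dif_pos hlt, if_pos (by rw [hsucc]; exact hc), hsucc]
    have : fwdZ xs j + ((d:Int)+1) ≤ gZ xs (j-d) + 1 := by omega
    calc fwdZ xs j + ((d+1 : Nat) : Int) = fwdZ xs j + ((d:Int)+1) := by push_cast; ring
    _ ≤ gZ xs (j-d) + 1 := this
    _ ≤ max (fwdZ xs (j-d-1)) (gZ xs (j-d) + 1) := le_max_right _ _

lemma g_le_maxg (xs : List Int) : ∀ k i, i ≤ k → gZ xs i ≤ maxgZ xs k := by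
  intro k
  induction k with
  | zero => intro i hi; interval_cases i; simp [maxgZ]
  | succ k ih =>
    intro i hi
    rcases Nat.eq_or_lt_of_le hi with h | h
    · subst h; exact le_max_right _ _
    · exact le_trans (ih i (by omega)) (le_max_left _ _)

lemma fwdbwd_le_maxg (xs : List Int) (j : Nat) (hj : j < xs.length) :
    fwdZ xs j + bwdZ xs j ≤ maxgZ xs (xs.length - 1) := by
  have hb := bwdZ_nonneg xs j
  have hdz : ((bwdZ xs j).toNat : Int) = bwdZ xs j := Int.toNat_of_nonneg hb
  have h1 := descend xs (bwdZ xs j).toNat j hj (le_of_eq hdz)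
  have h2 := g_le_maxg xs (xs.length - 1) (j - (bwdZ xs j).toNat) (by omega)
  omega

lemma best_le_maxg (xs : List Int) : ∀ k, k ≤ xs.length - 1 → xs.length ≠ 0 →
    bestZ xs k ≤ maxgZ xs (xs.length - 1) := by
  intro k
  induction k with
  | zero =>
    intro _ hn
    have := fwdbwd_le_maxg xs 0 (by omega)
    simp only [fwdZ, bwdZ] at this
    simpa [bestZ] using this
  | succ k ih =>
    intro hk hn
    simp only [bestZ]
    exact max_le (ih (by omega) hn) (fwdbwd_le_maxg xs (k+1) (by omega))

lemma core (xs : List Int) (h : xs.length ≠ 0) :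
    maxgZ xs (xs.length - 1) = bestZ xs (xs.length - 1) :=
  le_antisymm (maxg_le_best xs _ le_rfl h) (best_le_maxg xs _ le_rfl h)

-- fold-max over the g list
lemma maxfold (xs : List Int) (m : Nat) :
    ((List.range m).map (fun j => gZ xs (j+1))).foldl max (gZ xs 0) = maxgZ xs m := by
  induction m with
  | zero => simp [maxgZ]
  | succ m ih => rw [List.range_succ]; simp [List.foldl_append, ih, maxgZ]

lemma md2_char (xs : List Int) (hn : xs.length ≠ 0) :
    List.foldl (fun md i =>
        if PySem.List.pyGetD xs i 0 ≥ PySem.List.pyGetD xs (i+1) 0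
        then PySem.List.pySetD md i
               (max (PySem.List.pyGetD md i 0) (PySem.List.pyGetD md (i+1) 0 + 1))
        else md)
      (List.foldl (fun md j =>
        if xs.getD (j+1) 0 ≥ xs.getD j 0 then md.set (j+1) (md.getD j 0 + 1) else md)
        (List.replicate xs.length (0:Int)) (List.range (xs.length - 1)))
      (PySem.List.pyRange (((xs.length - 1 : Nat) : Int) - 1) (-1) (-1))
    = (List.range xs.length).map (fun j => gZ xs j) := by
  obtain ⟨h1len, h1get⟩ := pass1_inv xs (xs.length - 1) (by omega)
  have hpre : ∀ j < xs.length,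
      (List.foldl (fun md j =>
        if xs.getD (j+1) 0 ≥ xs.getD j 0 then md.set (j+1) (md.getD j 0 + 1) else md)
        (List.replicate xs.length (0:Int)) (List.range (xs.length - 1))).getD j 0
      = if xs.length - 1 ≤ j then gZ xs j else fwdZ xs j := by
    intro j hj
    rw [h1get j hj, if_pos (by omega)]
    by_cases hj1 : xs.length - 1 ≤ j
    · have hje : j = xs.length - 1 := by omega
      subst hje
      rw [if_pos le_rfl]
      conv_rhs => rw [gZ]
      rw [dif_neg (by omega)]
    · rw [if_neg hj1]
  obtain ⟨h2len, h2get⟩ := pass2_inv xs (xs.length - 1) le_rfl _ h1len hpre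
  apply List.ext_getElem (by rw [h2len]; simp)
  intro i hi1 hi2
  have hilt : i < xs.length := by rw [← h2len]; exact hi1
  have := h2get i hilt
  rw [List.getD_eq_getElem _ _ hi1] at this
  rw [this]
  simp [List.getElem_map, List.getElem_range]

lemma A_eq (xs : List Int) (hn : xs.length ≠ 0) :
    solution xs = bestZ xs (xs.length - 1) := by
  unfold solution
  simp only []
  rw [show ((xs.length : Int)) - 2 = ((xs.length - 1 : Nat) : Int) - 1 by omega,
      show ((xs.length : Int)) = 1 + ((xs.length - 1 : Nat) : Int) by omega,
      pass1_toNat, md2_char xs hn]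
  obtain ⟨m, hm⟩ : ∃ m, xs.length = m + 1 := ⟨xs.length - 1, by omega⟩
  rw [hm]
  rw [List.range_succ_eq_map]
  simp only [List.map_cons, List.map_map]
  rw [PySem.List.max?_id_cons]
  simp only [Option.getD_some]
  have hcomp : (List.range m).map ((fun j => gZ xs j) ∘ Nat.succ)
      = (List.range m).map (fun j => gZ xs (j+1)) := rfl
  rw [hcomp, maxfold, show m + 1 - 1 = m by omega]
  have := core xs hn
  rw [hm, show m + 1 - 1 = m by omega] at this
  exact this

lemma B_eq (xs : List Int) (hn : xs.length ≠ 0) :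
    solution_alt xs = bestZ xs (xs.length - 1) := by
  unfold solution_alt
  rw [show ((xs.length : Int)) = 1 + ((xs.length - 1 : Nat) : Int) by omega, B_inv]

theorem solution_spec : Claim_equal_solution := by
  intro blocks _ hp
  unfold Spec_solution
  have hn : blocks.length ≠ 0 := fun h => hp (List.length_eq_zero_iff.mp h)
  rw [A_eq blocks hn, B_eq blocks hn]
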